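-- pv_equiv track=rewrite | github.com/airium/AfterCollation | helpers/misc.py | toEnabledList
-- ===== SOURCE A (Python) =====
-- from typing import Callable, Optional, Iterable
--
-- def toEnabledList(values: Iterable[str]) -> list[bool]:
--     '''
--     all None = enable all
--     partial yes = enable these yes
--     partial no = enable remaining
--     yes and no both exists = only enable these yes (excluding these None)
--     '''
--     ret = []
--     for v in values:
--         if v == '':
--             ret.append(None)
--         elif v.lower() in ('n', 'no', 'not', 'negative', 'f', 'false', '0'):
--             ret.append(False)
--         else:
--             ret.append(True)
--     if all(r is None for r in ret):
--         return [True] * len(ret)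
--     elif any(r is True for r in ret):
--         return [(False if r is None else True) for r in ret]
--     else:
--         return [(True if r is None else False) for r in ret]
-- ===== SOURCE B (Python) =====
-- def toEnabledList(values):
--     no_words = ('n', 'no', 'not', 'negative', 'f', 'false', '0')
--     is_empty = []
--     any_yes = False
--     for v in values:
--         e = (v == '')
--         is_empty.append(e)
--         if not e and v.lower() not in no_words:
--             any_yes = True
--     return [e != any_yes for e in is_empty]
-- ===== Notes on version B (the rewrite author's own statement) =====
-- stated objective: simpler
-- what changed: Replaced the three-state None/False/True classification list plus three final-mapping branches with a single pass recording per-element emptiness and one global anyYes flag, the result being emptiness XOR anyYes.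
import Mathlib
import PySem

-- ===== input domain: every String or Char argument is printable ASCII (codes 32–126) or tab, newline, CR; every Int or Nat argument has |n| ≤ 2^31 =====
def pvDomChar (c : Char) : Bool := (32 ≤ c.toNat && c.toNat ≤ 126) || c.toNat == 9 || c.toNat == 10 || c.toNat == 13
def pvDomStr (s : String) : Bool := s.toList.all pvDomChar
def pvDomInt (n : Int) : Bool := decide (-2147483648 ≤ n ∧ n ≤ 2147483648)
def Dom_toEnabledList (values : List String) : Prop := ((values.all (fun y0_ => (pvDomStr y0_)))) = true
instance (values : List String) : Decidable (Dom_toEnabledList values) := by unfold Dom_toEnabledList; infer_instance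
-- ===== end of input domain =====

-- B replaces A's three-state Option classification and three final-mapping branches by one pass
-- collecting per-element emptiness plus a single anyYes flag, combined by XOR (objective: simpler).

-- ===== PORT A =====
def pvNoWords : List String := ["n", "no", "not", "negative", "f", "false", "0"]

def toEnabledList (values : List String) : List Bool :=
  let ret : List (Option Bool) := values.foldl (fun acc v =>
    if v = "" then acc ++ [none]
    else if pvNoWords.contains (PySem.Str.lower v) then acc ++ [some false]
    else acc ++ [some true]) []
  if ret.all (fun r => r == none) then List.replicate ret.length true
  else if ret.any (fun r => r == some true) then ret.map (fun r => if r == none then false else true)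
  else ret.map (fun r => if r == none then true else false)

-- ===== PORT B =====
def toEnabledList_alt (values : List String) : List Bool :=
  let st : List Bool × Bool := values.foldl (fun st v =>
    let e : Bool := v == ""
    (st.1 ++ [e], st.2 || (!e && !(pvNoWords.contains (PySem.Str.lower v))))) ([], false)
  st.1.map (fun e => e != st.2)

-- ===== PRECONDITION & SPEC =====
def Spec_toEnabledList (values : List String) (out : List Bool) : Prop := out = toEnabledList_alt values
instance (values : List String) (out : List Bool) : Decidable (Spec_toEnabledList values out) := by unfold Spec_toEnabledList; infer_instance

-- ===== CLAIM (what is proved, stated in full; the proofs are below) =====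
def Claim_equal_toEnabledList : Prop := ∀ (values : List String), Dom_toEnabledList values → Spec_toEnabledList values (toEnabledList values)

-- ===== LEMMAS AND PROOFS =====

def pvClassify (v : String) : Option Bool :=
  if v = "" then none
  else if pvNoWords.contains (PySem.Str.lower v) then some false
  else some true

def pvIsYes (v : String) : Bool := !(v == "") && !(pvNoWords.contains (PySem.Str.lower v))

lemma foldA_eq_map (values : List String) (acc : List (Option Bool)) :
    values.foldl (fun acc v =>
      if v = "" then acc ++ [none]
      else if pvNoWords.contains (PySem.Str.lower v) then acc ++ [some false]
      else acc ++ [some true]) acc = acc ++ values.map pvClassify := by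
  induction values generalizing acc with
  | nil => simp
  | cons v vs ih =>
    simp only [List.foldl_cons, List.map_cons, pvClassify]
    split_ifs with h1 h2 <;> rw [ih] <;> simp_all

lemma foldB_eq (values : List String) (acc : List Bool) (b : Bool) :
    values.foldl (fun (st : List Bool × Bool) v =>
      let e : Bool := v == ""
      (st.1 ++ [e], st.2 || (!e && !(pvNoWords.contains (PySem.Str.lower v))))) (acc, b)
    = (acc ++ values.map (fun v => v == ""), b || values.any pvIsYes) := by
  induction values generalizing acc b with
  | nil => simp
  | cons v vs ih =>
    simp only [List.foldl_cons]
    rw [ih]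
    simp [pvIsYes, Bool.or_assoc]

lemma classify_isNone (v : String) : (pvClassify v).isNone = (v == "") := by
  by_cases h : v = ""
  · simp [pvClassify, h]
  · simp only [pvClassify, h, if_false]
    split_ifs <;> simp [h]

lemma classify_some_true (v : String) : (pvClassify v == some true) = pvIsYes v := by
  by_cases h : v = ""
  · simp [pvClassify, pvIsYes, h]
  · by_cases h2 : PySem.Str.lower v ∈ pvNoWords <;> simp [pvClassify, pvIsYes, h, h2]

-- ===== VERDICT (by name: the statement is the Claim_ definition above) =====
theorem toEnabledList_spec : Claim_equal_toEnabledList := by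
  intro values _
  unfold Spec_toEnabledList toEnabledList toEnabledList_alt
  simp only [foldA_eq_map, foldB_eq, List.nil_append]
  have hall : (values.map pvClassify).all (fun r => r == none) = values.all (fun v => v == "") := by
    simp [List.all_map, Function.comp_def, classify_isNone]
  have hany : (values.map pvClassify).any (fun r => r == some true) = values.any pvIsYes := by
    simp [List.any_map, Function.comp_def, classify_some_true]
  by_cases hA : values.all (fun v => v == "") = true
  · -- all empty: anyYes is false
    have hyes : values.any pvIsYes = false := by
      rw [Bool.eq_false_iff]
      intro hc
      obtain ⟨v, hv, hvy⟩ := List.any_eq_true.mp hc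
      have := List.all_eq_true.mp hA v hv
      simp [pvIsYes] at hvy
      simp_all
    rw [hall]
    simp only [hA, if_true, hyes, Bool.or_false]
    rw [List.map_map]
    symm
    rw [List.eq_replicate_iff]
    refine ⟨by simp, ?_⟩
    intro b hb
    obtain ⟨v, hv, hvb⟩ := List.mem_map.mp hb
    have := List.all_eq_true.mp hA v hv
    simp_all
  · rw [hall]
    simp only [hA, hany, Bool.false_or]
    by_cases hY : values.any pvIsYes = true
    · simp only [hY, if_true, List.map_map]
      apply List.map_congr_left
      intro v _
      simp only [Function.comp_apply]
      by_cases h : v = "" <;> simp [pvClassify, h] <;> split_ifs <;> simp [h]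
    · simp only [Bool.not_eq_true] at hY
      simp only [hY, Bool.false_eq_true, if_false, List.map_map]
      apply List.map_congr_left
      intro v _
      simp only [Function.comp_apply]
      by_cases h : v = "" <;> simp [pvClassify, h] <;> split_ifs <;> simp [h]
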